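-- pv_equiv track=rewrite | github.com/siri-n-shetty/codeforces-solutions | 2128a-recycling-center.py | coins_to_destroy
-- ===== SOURCE A (Python) =====
-- def coins_to_destroy(test_cases):
--     results = []
--     for n, c, a in test_cases:
--         coins = 0
--         dl = []
--         for x in a:
--             if x > c:
--                 coins += 1
--             else:
--                 v = c // x
--                 d = 0
--                 while (1 << (d + 1)) <= v:
--                     d += 1
--                 dl.append(d)
--
--         dl.sort()
--         t = 0
--         freeOK = 0
--         for d in dl:
--             if t <= d:
--                 freeOK += 1
--                 t += 1
--         coins += len(dl) - freeOK
--         results.append(coins)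
--     return results
-- ===== SOURCE B (Python) =====
-- def coins_to_destroy(test_cases):
--     results = []
--     for n, c, a in test_cases:
--         paid = 0
--         ds = []
--         for x in a:
--             if x > c:
--                 paid += 1
--             else:
--                 ds.append(max(c // x, 1).bit_length() - 1)
--         if ds:
--             cnt = [0] * (max(ds) + 1)
--             for d in ds:
--                 cnt[d] += 1
--             t = 0
--             for d, k in enumerate(cnt):
--                 t = min(t + k, d + 1)
--             results.append(paid + len(ds) - t)
--         else:
--             results.append(paid)
--     return results
-- ===== Notes on version B (the rewrite author's own statement) =====
-- stated objective: alternative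
-- what changed: Replaces the per-element doubling while-loop by int.bit_length and the sort-then-per-element greedy by a counting bucket array walked once in ascending d with the batched recurrence t = min(t + cnt[d], d + 1).
import Mathlib
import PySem

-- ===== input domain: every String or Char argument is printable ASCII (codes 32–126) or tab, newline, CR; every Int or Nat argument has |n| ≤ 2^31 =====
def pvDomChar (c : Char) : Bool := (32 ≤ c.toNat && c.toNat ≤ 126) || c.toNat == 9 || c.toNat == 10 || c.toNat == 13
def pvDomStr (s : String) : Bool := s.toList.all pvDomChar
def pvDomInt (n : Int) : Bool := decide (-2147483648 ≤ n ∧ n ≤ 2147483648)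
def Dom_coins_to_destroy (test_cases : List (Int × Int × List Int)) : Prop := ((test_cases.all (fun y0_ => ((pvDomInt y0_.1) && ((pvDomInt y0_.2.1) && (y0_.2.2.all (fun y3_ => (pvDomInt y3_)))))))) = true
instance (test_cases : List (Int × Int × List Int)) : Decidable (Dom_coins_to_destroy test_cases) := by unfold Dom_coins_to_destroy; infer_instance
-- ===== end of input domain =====

-- B replaces A's per-element doubling while-loop by int.bit_length and A's sort + per-element
-- greedy by counting buckets walked once with t = min(t + cnt, d + 1); return values proved equal.

-- ===== PORT A =====
-- the 'while (1 << (d + 1)) <= v: d += 1' loop of A (1 << k = 2^k); d is a Python int that stays ≥ 0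
def pvLoopD (v : Int) (d : Nat) : Int :=
  if 2 ^ (d + 1) ≤ v then pvLoopD v (d + 1) else (d : Int)
termination_by v.toNat - d
decreasing_by
  rename_i h
  have h3 : (d + 1 : Nat) < 2 ^ (d + 1) := Nat.lt_two_pow_self
  have h4 : ((2 ^ (d + 1) : Nat) : Int) ≤ v := by push_cast; exact h
  omega

def coins_to_destroy (test_cases : List (Int × Int × List Int)) : List Int :=
  test_cases.foldl (fun results tc =>
    -- for n, c, a in test_cases (n = tc.1 is unused)
    -- first loop: coins += 1 for x > c, else dl.append(d) for v = c // x
    let st := tc.2.2.foldl (fun (st : Int × List Int) x =>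
      if x > tc.2.1 then (st.1 + 1, st.2)
      else (st.1, st.2 ++ [pvLoopD (PySem.Int.floordiv tc.2.1 x) 0])) (0, [])
    -- dl.sort()
    let dl := PySem.List.sorted st.2 (fun d => d) false
    -- greedy second loop over (t, freeOK)
    let tf := dl.foldl (fun (tf : Int × Int) d =>
      if tf.1 ≤ d then (tf.1 + 1, tf.2 + 1) else tf) ((0 : Int), (0 : Int))
    results ++ [st.1 + (dl.length : Int) - tf.2]) []

-- ===== PORT B =====
def coins_to_destroy_alt (test_cases : List (Int × Int × List Int)) : List Int :=
  test_cases.foldl (fun results tc =>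
    -- first loop: paid += 1 for x > c, else ds.append(max(c // x, 1).bit_length() - 1)
    let st := tc.2.2.foldl (fun (st : Int × List Int) x =>
      if x > tc.2.1 then (st.1 + 1, st.2)
      else (st.1, st.2 ++ [(PySem.Int.bitLength (max (PySem.Int.floordiv tc.2.1 x) 1) : Int) - 1])) (0, [])
    if st.2.isEmpty then results ++ [st.1]
    else
      -- cnt = [0] * (max(ds) + 1); every d in ds is ≥ 0, so cnt[d] is set/getD at index d.toNat
      let cnt := st.2.foldl (fun (cnt : List Int) d => cnt.set d.toNat (cnt.getD d.toNat 0 + 1))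
        (List.replicate (((PySem.List.max? st.2 (fun d => d)).getD 0 + 1).toNat) (0 : Int))
      -- for d, k in enumerate(cnt): t = min(t + k, d + 1)
      let t := (PySem.List.enumerate cnt).foldl (fun t p => min (t + p.2) (p.1 + 1)) (0 : Int)
      results ++ [st.1 + (st.2.length : Int) - t]) []

-- ===== PRECONDITION & SPEC =====
-- Pre_ excludes exactly the inputs where Python A raises ZeroDivisionError (some item x = 0 with
-- c ≥ 0, so the 'x > c' branch is not taken and c // x divides by zero); B raises there too.
def Pre_coins_to_destroy (test_cases : List (Int × Int × List Int)) : Prop :=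
  ∀ tc ∈ test_cases, ∀ x ∈ tc.2.2, x = 0 → tc.2.1 < 0
instance (test_cases : List (Int × Int × List Int)) : Decidable (Pre_coins_to_destroy test_cases) := by
  unfold Pre_coins_to_destroy; infer_instance
def pvWitness_coins_to_destroy : (List (Int × Int × List Int)) := [(2, 10, [3, 100])]
def Spec_coins_to_destroy (test_cases : List (Int × Int × List Int)) (out : List Int) : Prop := out = coins_to_destroy_alt test_cases
instance (test_cases : List (Int × Int × List Int)) (out : List Int) : Decidable (Spec_coins_to_destroy test_cases out) := by unfold Spec_coins_to_destroy; infer_instance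

-- ===== CLAIM (what is proved, stated in full; the proofs are below) =====
def Claim_equal_coins_to_destroy : Prop := ∀ (test_cases : List (Int × Int × List Int)), Dom_coins_to_destroy test_cases → Pre_coins_to_destroy test_cases → Spec_coins_to_destroy test_cases (coins_to_destroy test_cases)

-- ===== LEMMAS AND PROOFS =====

-- A's greedy scan, single accumulator (the pair fold of A carries t = freeOK, see pvPairFold)
def pvGT (l : List Int) (t : Int) : Int := l.foldl (fun t d => if t ≤ d then t + 1 else t) t

-- the bucket decomposition of a sorted list: blocks of equal values j, for j over js
def pvF (cnt : Nat → Nat) (js : List Nat) : List Int :=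
  js.flatMap (fun j => List.replicate (cnt j) ((j : Nat) : Int))

lemma pvPairFold (l : List Int) (t : Int) :
    l.foldl (fun (tf : Int × Int) d => if tf.1 ≤ d then (tf.1 + 1, tf.2 + 1) else tf) (t, t)
      = (pvGT l t, pvGT l t) := by
  induction l generalizing t with
  | nil => rfl
  | cons d l ih => simp only [pvGT, List.foldl_cons]; split <;> simp_all [pvGT]

lemma pvBL_pos (v : Int) (h : v ≠ 0) : 1 ≤ PySem.Int.bitLength v := by
  by_contra hh
  have h2 := PySem.Int.lt_two_pow_bitLength v
  have h3 : PySem.Int.bitLength v = 0 := by omega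
  rw [h3] at h2
  simp at h2
  omega

-- the while-loop lands on bit_length(v) - 1 once 2^d ≤ v
lemma pvLoopD_spec (v : Int) (d : Nat) (h1 : 1 ≤ v) (h2 : 2 ^ d ≤ v.toNat) :
    pvLoopD v d = ((PySem.Int.bitLength v - 1 : Nat) : Int) := by
  induction d using pvLoopD.induct (v := v) with
  | case1 d hif ih =>
    rw [pvLoopD, if_pos hif]
    refine ih ?_
    have : ((2 ^ (d + 1) : Nat) : Int) ≤ v := by push_cast; exact hif
    omega
  | case2 d hif =>
    rw [pvLoopD, if_neg hif]
    have hv : v.natAbs = v.toNat := by omega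
    set bl := PySem.Int.bitLength v with hbl
    have hb1 : 2 ^ (bl - 1) ≤ v.natAbs := PySem.Int.two_pow_bitLength_le v (by omega)
    have hb2 : v.natAbs < 2 ^ bl := PySem.Int.lt_two_pow_bitLength v
    have hbp : 1 ≤ bl := pvBL_pos v (by omega)
    have hlt : v.toNat < 2 ^ (d + 1) := by
      have : v < ((2 ^ (d + 1) : Nat) : Int) := by push_cast; omega
      omega
    have e1 : d < bl := by
      by_contra hh
      have : (2:Nat) ^ bl ≤ 2 ^ d := Nat.pow_le_pow_right (by norm_num) (by omega)
      omega
    have e2 : bl - 1 < d + 1 := by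
      by_contra hh
      have : (2:Nat) ^ (d + 1) ≤ 2 ^ (bl - 1) := Nat.pow_le_pow_right (by norm_num) (by omega)
      omega
    have : d = bl - 1 := by omega
    omega

-- the while-loop IS bit_length(max(v, 1)) - 1
lemma pvLoopD_eq_bitLength (v : Int) :
    pvLoopD v 0 = (PySem.Int.bitLength (max v 1) : Int) - 1 := by
  by_cases h : 1 ≤ v
  · rw [max_eq_left h, pvLoopD_spec v 0 h (by omega)]
    have := pvBL_pos v (by omega)
    omega
  · rw [max_eq_right (by omega), pvLoopD, if_neg (by norm_num; omega)]
    norm_num [show PySem.Int.bitLength 1 = 1 from rfl]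

-- the shared classification pass: the Int counts the x > c, the list collects g of the rest
lemma pvClassify (c : Int) (g : Int → Int) (a : List Int) (c0 : Int) (l0 : List Int) :
    a.foldl (fun (st : Int × List Int) x =>
        if x > c then (st.1 + 1, st.2) else (st.1, st.2 ++ [g x])) (c0, l0)
      = (c0 + (a.countP (fun x => decide (x > c)) : Int),
         l0 ++ (a.filter (fun x => decide (¬ x > c))).map g) := by
  induction a generalizing c0 l0 with
  | nil => simp
  | cons x a ih =>
    simp only [List.foldl_cons, List.countP_cons, List.filter_cons]
    by_cases hx : x > c <;> simp [hx, ih] <;> ring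

lemma pvCntFold_length (ds : List Int) (cnt : List Int) :
    (ds.foldl (fun (cnt : List Int) d => cnt.set d.toNat (cnt.getD d.toNat 0 + 1)) cnt).length
      = cnt.length := by
  induction ds generalizing cnt with
  | nil => rfl
  | cons d ds ih => simp only [List.foldl_cons]; rw [ih]; simp

lemma pvCntFold_getD (ds : List Int) (cnt : List Int) (j : Nat)
    (hb : ∀ d ∈ ds, 0 ≤ d ∧ d.toNat < cnt.length) :
    (ds.foldl (fun (cnt : List Int) d => cnt.set d.toNat (cnt.getD d.toNat 0 + 1)) cnt).getD j 0
      = cnt.getD j 0 + (ds.count ((j : Nat) : Int) : Int) := by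
  induction ds generalizing cnt with
  | nil => simp
  | cons d ds ih =>
    have hd := hb d (by simp)
    simp only [List.foldl_cons]
    rw [ih _ (fun e he => by simpa [List.length_set] using hb e (by simp [he]))]
    rw [List.count_cons]
    have hset : (cnt.set d.toNat (cnt.getD d.toNat 0 + 1)).getD j 0
        = cnt.getD j 0 + (if d.toNat = j then 1 else 0) := by
      by_cases hj : d.toNat = j
      · subst hj
        simp [List.getD, hd.2]
      · simp [List.getD, hj]
    rw [hset]
    by_cases hj : d.toNat = j
    · have hdj : d = ((j : Nat) : Int) := by omega
      simp only [hdj, beq_self_eq_true]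
      rw [if_pos (by omega : ((j : Nat) : Int).toNat = j)]
      push_cast
      ring
    · have hdj : (d == ((j : Nat) : Int)) = false := by rw [beq_eq_false_iff_ne]; omega
      simp only [hdj, if_neg hj]
      simp

lemma pvF_count (ds : List Int) (k : Nat) (x : Int) :
    (pvF (fun j => ds.count ((j : Nat) : Int)) (List.range k)).count x
      = if 0 ≤ x ∧ x.toNat < k then ds.count x else 0 := by
  induction k with
  | zero =>
    simp only [List.range_zero, pvF, List.flatMap_nil, List.count_nil]
    rw [if_neg (by omega)]
  | succ k ih =>
    rw [List.range_succ]
    simp only [pvF, List.flatMap_append, List.count_append, List.flatMap_cons, List.flatMap_nil,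
      List.append_nil] at ih ⊢
    rw [ih, List.count_replicate]
    by_cases hx : x = ((k : Nat) : Int)
    · subst hx
      have hc1 : ¬(0 ≤ ((k : Nat) : Int) ∧ ((k : Nat) : Int).toNat < k) := by omega
      have hc2 : 0 ≤ ((k : Nat) : Int) ∧ ((k : Nat) : Int).toNat < k + 1 := by omega
      rw [if_neg hc1, if_pos hc2]
      simp
    · have hbe : (((k : Nat) : Int) == x) = false := by rw [beq_eq_false_iff_ne]; exact Ne.symm hx
      rw [hbe]
      by_cases h1 : 0 ≤ x ∧ x.toNat < k
      · rw [if_pos h1, if_pos (show 0 ≤ x ∧ x.toNat < k + 1 by omega)]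
        simp
      · rw [if_neg h1, if_neg (show ¬(0 ≤ x ∧ x.toNat < k + 1) by omega)]
        simp

lemma pvF_mem (cnt : Nat → Nat) (k : Nat) (x : Int) (hx : x ∈ pvF cnt (List.range k)) :
    0 ≤ x ∧ x.toNat < k := by
  simp only [pvF, List.mem_flatMap, List.mem_range, List.mem_replicate] at hx
  obtain ⟨j, hj, _, rfl⟩ := hx
  omega

lemma pvF_sorted (cnt : Nat → Nat) (k : Nat) :
    (pvF cnt (List.range k)).Pairwise (· ≤ ·) := by
  induction k with
  | zero => simp [pvF]
  | succ k ih =>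
    rw [List.range_succ]
    simp only [pvF, List.flatMap_append, List.flatMap_cons, List.flatMap_nil, List.append_nil]
    rw [List.pairwise_append]
    refine ⟨ih, by simp [List.pairwise_replicate], ?_⟩
    intro a ha b hb
    have h1 := pvF_mem cnt k a ha
    have h2 : b = ((k : Nat) : Int) := (List.mem_replicate.1 hb).2
    omega

-- sorted(ds) is the concatenation of the buckets 0 .. k-1, when all values lie in [0, k)
lemma pvSorted_eq_F (ds : List Int) (k : Nat)
    (hb : ∀ d ∈ ds, 0 ≤ d ∧ d.toNat < k) :
    PySem.List.sorted ds (fun d => d) false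
      = pvF (fun j => ds.count ((j : Nat) : Int)) (List.range k) := by
  apply PySem.List.sorted_id_eq_of_perm_of_pairwise
  · rw [List.perm_iff_count]
    intro x
    rw [pvF_count]
    by_cases h : 0 ≤ x ∧ x.toNat < k
    · rw [if_pos h]
    · rw [if_neg h]
      symm
      rw [List.count_eq_zero]
      intro hx
      exact h (hb x hx)
  · exact pvF_sorted _ k

-- greedy over one bucket of equal values j: frees until t reaches j + 1
lemma pvGT_replicate (n : Nat) (j t : Int) (h : t ≤ j + 1) :
    pvGT (List.replicate n j) t = min (t + n) (j + 1) := by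
  induction n generalizing t with
  | zero => simp [pvGT]; omega
  | succ n ih =>
    simp only [List.replicate_succ, pvGT, List.foldl_cons]
    by_cases hc : t ≤ j
    · simp only [if_pos hc]
      rw [show (List.replicate n j).foldl _ (t + 1) = pvGT (List.replicate n j) (t + 1) from rfl,
        ih (t + 1) (by omega)]
      push_cast; omega
    · simp only [if_neg hc]
      rw [show (List.replicate n j).foldl _ t = pvGT (List.replicate n j) t from rfl, ih t h]
      push_cast; omega

-- greedy over the buckets = batched min-recurrence over the ascending values
lemma pvGT_F (cnt : Nat → Nat) (len a : Nat) (t : Int) (h : t ≤ (a : Int)) :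
    pvGT (pvF cnt (List.range' a len)) t
      = (List.range' a len).foldl (fun t j => min (t + (cnt j : Int)) ((j : Int) + 1)) t := by
  induction len generalizing a t with
  | zero => rfl
  | succ len ih =>
    rw [List.range'_succ]
    simp only [pvF, List.flatMap_cons, List.foldl_cons]
    rw [show pvGT (List.replicate (cnt a) ((a : Nat) : Int)
            ++ (List.range' (a + 1) len).flatMap (fun j => List.replicate (cnt j) ((j : Nat) : Int))) t
          = pvGT ((List.range' (a + 1) len).flatMap (fun j => List.replicate (cnt j) ((j : Nat) : Int)))
              (pvGT (List.replicate (cnt a) ((a : Nat) : Int)) t) from List.foldl_append ..]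
    rw [pvGT_replicate _ _ _ (by omega)]
    exact ih (a + 1) _ (by push_cast; omega)

-- per test case the two bodies agree
lemma pvCase (c : Int) (a : List Int) :
    (let st := a.foldl (fun (st : Int × List Int) x =>
       if x > c then (st.1 + 1, st.2)
       else (st.1, st.2 ++ [pvLoopD (PySem.Int.floordiv c x) 0])) (0, [])
     let dl := PySem.List.sorted st.2 (fun d => d) false
     let tf := dl.foldl (fun (tf : Int × Int) d =>
       if tf.1 ≤ d then (tf.1 + 1, tf.2 + 1) else tf) ((0 : Int), (0 : Int))
     st.1 + (dl.length : Int) - tf.2)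
    = (let st := a.foldl (fun (st : Int × List Int) x =>
         if x > c then (st.1 + 1, st.2)
         else (st.1, st.2 ++ [(PySem.Int.bitLength (max (PySem.Int.floordiv c x) 1) : Int) - 1])) (0, [])
       if st.2.isEmpty then st.1
       else
         let cnt := st.2.foldl (fun (cnt : List Int) d => cnt.set d.toNat (cnt.getD d.toNat 0 + 1))
           (List.replicate (((PySem.List.max? st.2 (fun d => d)).getD 0 + 1).toNat) (0 : Int))
         let t := (PySem.List.enumerate cnt).foldl (fun t p => min (t + p.2) (p.1 + 1)) (0 : Int)
         st.1 + (st.2.length : Int) - t) := by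
  have hg : (fun x => pvLoopD (PySem.Int.floordiv c x) 0)
      = (fun x => (PySem.Int.bitLength (max (PySem.Int.floordiv c x) 1) : Int) - 1) :=
    funext fun x => pvLoopD_eq_bitLength _
  dsimp only
  rw [pvClassify, pvClassify, hg]
  simp only [List.nil_append]
  set g := (fun x => (PySem.Int.bitLength (max (PySem.Int.floordiv c x) 1) : Int) - 1) with hgdef
  set ds := (a.filter (fun x => decide (¬ x > c))).map g with hds
  by_cases hne : ds = []
  · rw [hne]
    simp [show PySem.List.sorted ([] : List Int) (fun d => d) false = [] from rfl]
  · have hE : ds.isEmpty = false := by simp [hne]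
    simp only [hE, Bool.false_eq_true, if_false]
    -- m = max(ds), k = (m + 1).toNat
    obtain ⟨m, hm⟩ : ∃ m, PySem.List.max? ds (fun d => d) = some m := by
      cases h : PySem.List.max? ds (fun d => d) with
      | none => exact absurd ((PySem.List.max?_eq_none_iff ds _).1 h) hne
      | some m => exact ⟨m, rfl⟩
    have hmax : ∀ y ∈ ds, y ≤ m := PySem.List.max?_isMax hm
    have helems : ∀ d ∈ ds, 0 ≤ d := by
      intro d hd
      rw [hds] at hd
      obtain ⟨x, -, rfl⟩ := List.mem_map.1 hd
      have h1 : max (PySem.Int.floordiv c x) 1 ≠ 0 := by omega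
      have := pvBL_pos _ h1
      simp only [hgdef]
      omega
    have hm0 : 0 ≤ m := helems m (PySem.List.max?_mem hm)
    set k := (m + 1).toNat with hk
    have hb : ∀ d ∈ ds, 0 ≤ d ∧ d.toNat < k := by
      intro d hd
      have := hmax d hd
      have := helems d hd
      omega
    rw [hm]
    simp only [Option.getD_some]
    -- A side: pair fold → pvGT, sorted → buckets, pvGT → min-recurrence over range
    rw [pvPairFold, PySem.List.length_sorted]
    rw [pvSorted_eq_F ds k hb]
    -- B side: cnt has length k and getD j 0 = count of j in ds
    set cnt := ds.foldl (fun (cnt : List Int) d => cnt.set d.toNat (cnt.getD d.toNat 0 + 1))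
      (List.replicate k (0 : Int)) with hcnt
    have hlen : cnt.length = k := by rw [hcnt, pvCntFold_length]; simp
    have hgetD : ∀ j < k, cnt.getD j 0 = (ds.count ((j : Nat) : Int) : Int) := by
      intro j hj
      rw [hcnt, pvCntFold_getD ds _ j (by simpa using hb)]
      rw [List.getD_replicate _ hj]
      ring
    rw [PySem.List.enumerate_eq_map_pyRange cnt 0]
    rw [show PySem.List.len cnt = ((k : Nat) : Int) from by simp [PySem.List.len, hlen]]
    rw [PySem.List.pyRange_zero_natCast, List.foldl_map, List.foldl_map]
    have hfold : (List.range k).foldl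
          (fun t j => min (t + PySem.List.pyGetD cnt ((j : Nat) : Int) 0) (((j : Nat) : Int) + 1)) 0
        = (List.range k).foldl (fun t j => min (t + (ds.count ((j : Nat) : Int) : Int)) (((j : Nat) : Int) + 1)) 0 := by
      apply PySem.List.foldl_congr_mem
      intro acc j hj
      rw [PySem.List.pyGetD_natCast, hgetD j (List.mem_range.1 hj)]
    rw [hfold]
    rw [List.range_eq_range', pvGT_F (fun j => ds.count ((j : Nat) : Int)) k 0 0 (by norm_num)]

-- ===== VERDICT (by name: the statement is the Claim_ definition above) =====
theorem coins_to_destroy_spec : Claim_equal_coins_to_destroy := by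
  intro tcs _ _
  unfold Spec_coins_to_destroy coins_to_destroy coins_to_destroy_alt
  apply PySem.List.foldl_congr_mem
  intro acc tc _
  have h := pvCase tc.2.1 tc.2.2
  dsimp only at h ⊢
  rw [h, apply_ite (fun z : Int => acc ++ [z])]
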